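-- pv_equiv track=rewrite | github.com/Pimdw/IPASS_WordFeud | algorithm.py | collect_vertical_word
-- ===== SOURCE A (Python) =====
-- def collect_vertical_word(anchor, board):
--     """
--     Collects a vertical word from the board starting from a given position and moving upwards and downwards
--     from that point until reaching a space.
--
--     Parameters:
--     - anchor (tuple): The starting (row, col) position on the board from which to collect the vertical word.
--     - board (list of lists): The board.
--
--     Returns:
--     - str: The word collected vertically from the board around the specified anchor position.
--     """
--     row, col = anchor
--     word = ""
--     while row > 0 and board[row - 1][col] != ' ':
--         row -= 1
--     while row < 15 and board[row][col] != ' ':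
--         word += board[row][col]
--         row += 1
--     return word
-- ===== SOURCE B (Python) =====
-- def collect_vertical_word(anchor, board):
--     row, col = anchor
--
--     def climb(r):
--         # walk up through the letters above r, then emit the word from the top
--         if r > 0 and board[r - 1][col] != ' ':
--             return climb(r - 1)
--         return emit(r)
--
--     def emit(r):
--         # build the word back-to-front on the way out of the recursion
--         if r < 15 and board[r][col] != ' ':
--             return board[r][col] + emit(r + 1)
--         return ''
--
--     return climb(row)
-- ===== Notes on version B (the rewrite author's own statement) =====
-- stated objective: alternative
-- what changed: A mutates a row cursor through two while loops and grows the word in a string accumulator; B is a pair of recursive functions (climb to the word's top, then emit) that build the word back-to-front by concatenation on the recursion unwind, with no mutable state. The access pattern is kept identical on purpose: A's value (and where it raises) depends on exactly which cells are read, so any exact re-implementation must read the same cells in the same order.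
import Mathlib
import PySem

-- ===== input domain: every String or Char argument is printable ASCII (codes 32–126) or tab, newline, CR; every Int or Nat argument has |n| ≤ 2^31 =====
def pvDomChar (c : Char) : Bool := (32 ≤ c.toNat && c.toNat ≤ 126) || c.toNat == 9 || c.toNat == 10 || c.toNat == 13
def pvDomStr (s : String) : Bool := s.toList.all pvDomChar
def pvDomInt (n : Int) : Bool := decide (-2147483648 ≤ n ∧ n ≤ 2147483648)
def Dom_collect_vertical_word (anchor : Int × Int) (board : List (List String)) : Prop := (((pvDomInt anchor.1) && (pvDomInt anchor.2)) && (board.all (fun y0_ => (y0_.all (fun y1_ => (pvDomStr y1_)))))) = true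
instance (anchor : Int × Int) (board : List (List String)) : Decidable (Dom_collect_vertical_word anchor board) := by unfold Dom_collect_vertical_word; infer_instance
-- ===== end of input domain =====

-- B replaces A's two cursor-mutating while loops by a recursive descent that finds the word's top
-- and builds the word back-to-front on the way out of the recursion (objective: alternative).


-- ===== PORT A =====
-- board[row][col]; the "" defaults are only reachable outside Pre_ (Python raises there)
def pvCell (board : List (List String)) (col row : Int) : String :=
  PySem.List.pyGetD (PySem.List.pyGetD board row []) col ""

-- while row > 0 and board[row-1][col] != ' ': row -= 1   (fuel row.toNat suffices: row decreases)
def pvUpA (board : List (List String)) (col : Int) : Nat → Int → Int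
  | 0, row => row
  | f + 1, row =>
      if 0 < row ∧ pvCell board col (row - 1) ≠ " " then pvUpA board col f (row - 1) else row

-- while row < 15 and board[row][col] != ' ': word += board[row][col]; row += 1   (fuel (15-row).toNat)
def pvDownA (board : List (List String)) (col : Int) : Nat → Int → String → String
  | 0, _, word => word
  | f + 1, row, word =>
      if row < 15 ∧ pvCell board col row ≠ " " then
        pvDownA board col f (row + 1) (word ++ pvCell board col row)
      else word

def collect_vertical_word (anchor : Int × Int) (board : List (List String)) : String :=
  let row := pvUpA board anchor.2 anchor.1.toNat anchor.1
  pvDownA board anchor.2 (15 - row).toNat row ""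

-- ===== PORT B =====
-- emit(r): the word from r downward, built back-to-front on recursion unwind (fuel (15-r).toNat)
def pvEmitB (board : List (List String)) (col : Int) : Nat → Int → String
  | 0, _ => ""
  | f + 1, r =>
      if r < 15 ∧ pvCell board col r ≠ " " then pvCell board col r ++ pvEmitB board col f (r + 1)
      else ""

-- climb(r): walk up through the letters above r, then emit from the top (fuel r.toNat)
def pvClimbB (board : List (List String)) (col : Int) : Nat → Int → String
  | 0, r => pvEmitB board col (15 - r).toNat r
  | f + 1, r =>
      if 0 < r ∧ pvCell board col (r - 1) ≠ " " then pvClimbB board col f (r - 1)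
      else pvEmitB board col (15 - r).toNat r

def collect_vertical_word_alt (anchor : Int × Int) (board : List (List String)) : String :=
  pvClimbB board anchor.2 anchor.1.toNat anchor.1

-- ===== PRECONDITION & SPEC =====
-- board[r][col] as Python evaluates it (negative indices wrap; none = IndexError)
def pvCellOpt (board : List (List String)) (col r : Int) : Option String :=
  (PySem.List.pyGet? board r).bind (fun rw => PySem.List.pyGet? rw col)
def pvOk (board : List (List String)) (col r : Int) : Bool := (pvCellOpt board col r).isSome
def pvBlank (board : List (List String)) (col r : Int) : Bool := pvCellOpt board col r == some " "
-- positions below `row` where A's upward scan stops (blank) or raises (invalid index)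
def pvUpEvents (board : List (List String)) (col row : Int) : List Nat :=
  (List.range board.length).filter (fun k => decide ((k : Int) < row) && (!pvOk board col k || pvBlank board col k))
-- where the downward scan starts: one past the last upward event (0 if none), or `row` itself if row ≤ 0
def pvStartPre (board : List (List String)) (col row : Int) : Int :=
  if 0 < row then
    match (pvUpEvents board col row).getLast? with
    | none => 0
    | some e => (e : Int) + 1
  else row
-- positions in [start, 15) where the downward scan stops (blank) or raises (invalid index)
def pvDownEvents (board : List (List String)) (col u : Int) : List Int :=
  (PySem.List.pyRange u 15 1).filter (fun r => !pvOk board col r || pvBlank board col r)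

-- Pre_ is exactly the closed-form description of the inputs on which the Python A returns
-- normally: the anchor row is within reach of the board, and each scan meets a blank cell
-- before it meets an invalid index (stated via the extremal event position of each scan).
def Pre_collect_vertical_word (anchor : Int × Int) (board : List (List String)) : Prop :=
  (0 < anchor.1 → anchor.1 ≤ (board.length : Int)) ∧
  ((anchor.1 ≤ 0 → -(board.length : Int) ≤ anchor.1) ∧
  (((pvUpEvents board anchor.2 anchor.1).getLast?.all (fun e => pvBlank board anchor.2 (e : Int))) = true ∧
  ((pvDownEvents board anchor.2 (pvStartPre board anchor.2 anchor.1)).head?.all (fun r => pvBlank board anchor.2 r)) = true))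
instance (anchor : Int × Int) (board : List (List String)) : Decidable (Pre_collect_vertical_word anchor board) := by
  unfold Pre_collect_vertical_word; infer_instance

def pvWitness_collect_vertical_word : (Int × Int) × List (List String) :=
  ((7, 3), List.replicate 15 (List.replicate 15 " "))

def Spec_collect_vertical_word (anchor : Int × Int) (board : List (List String)) (out : String) : Prop := out = collect_vertical_word_alt anchor board
instance (anchor : Int × Int) (board : List (List String)) (out : String) : Decidable (Spec_collect_vertical_word anchor board out) := by unfold Spec_collect_vertical_word; infer_instance

-- ===== CLAIM (what is proved, stated in full; the proofs are below) =====
def Claim_equal_collect_vertical_word : Prop := ∀ (anchor : Int × Int) (board : List (List String)), Dom_collect_vertical_word anchor board → Pre_collect_vertical_word anchor board → Spec_collect_vertical_word anchor board (collect_vertical_word anchor board)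

-- ===== LEMMAS AND PROOFS =====

-- A's accumulator loop is B's back-to-front emit, appended to the accumulator
theorem pvDownA_eq_emit (board : List (List String)) (col : Int) (f : Nat) :
    ∀ (r : Int) (w : String), pvDownA board col f r w = w ++ pvEmitB board col f r := by
  induction f with
  | zero => intro r w; simp [pvDownA, pvEmitB, String.append_empty]
  | succ g ih =>
    intro r w
    simp only [pvDownA, pvEmitB]
    by_cases h : r < 15 ∧ pvCell board col r ≠ " "
    · rw [if_pos h, if_pos h, ih, String.append_assoc]
    · rw [if_neg h, if_neg h, String.append_empty]

-- B's climb stops exactly where A's upward loop stops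
theorem pvClimbB_eq_upA (board : List (List String)) (col : Int) (f : Nat) :
    ∀ (r : Int), pvClimbB board col f r =
      pvEmitB board col (15 - pvUpA board col f r).toNat (pvUpA board col f r) := by
  induction f with
  | zero => intro r; simp [pvClimbB, pvUpA]
  | succ g ih =>
    intro r
    simp only [pvClimbB, pvUpA]
    by_cases h : 0 < r ∧ pvCell board col (r - 1) ≠ " "
    · rw [if_pos h, if_pos h, ih]
    · rw [if_neg h, if_neg h]

-- ===== VERDICT (by name: the statement is the Claim_ definition above) =====
theorem collect_vertical_word_spec : Claim_equal_collect_vertical_word := by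
  intro anchor board _ _
  unfold Spec_collect_vertical_word collect_vertical_word collect_vertical_word_alt
  rw [pvClimbB_eq_upA, pvDownA_eq_emit, String.empty_append]
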